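-- pv_equiv track=rewrite | github.com/olivierinizan/KES2025 | vickey/restaurant/ContextVickey2.py | partition_all_context
-- ===== SOURCE A (Python) =====
-- def partition_all_context(all_context):
--     context_partionned = {}
--     for p in ("P1","P2","P3","P4","P5","P6","P7","P8"):
--         context_partionned[p] = []
--     for l in all_context:
--         pair = l[0]
--         context = l[1]
--         if is_P1(context):
--             context_partionned["P1"].append(l)
--         elif is_P2(context):
--             context_partionned["P2"].append(l)
--         elif is_P3(context):
--             context_partionned["P3"].append(l)
--         elif is_P4(context):
--             context_partionned["P4"].append(l)
--         elif is_P5(context):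
--             context_partionned["P5"].append(l)
--         elif is_P6(context):
--             context_partionned["P6"].append(l)
--         elif is_P7(context):
--             context_partionned["P7"].append(l)
--         elif is_P8(context):
--             context_partionned["P8"].append(l)
--     return context_partionned
--
-- def is_epsilon_empty(context):
--     return len(context[0]) == 0
--
-- def is_delta_empty(context):
--     return len(context[1]) == 0
--
-- def is_omega_empty(context):
--     return len(context[2]) == 0
--
-- def is_P1(context):
--     return is_epsilon_empty(context) and is_delta_empty(context) and is_omega_empty(context)
--
-- def is_P2(context):
--     return is_epsilon_empty(context) and is_delta_empty(context) and not is_omega_empty(context)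
--
-- def is_P3(context):
--     return is_epsilon_empty(context) and not is_delta_empty(context) and is_omega_empty(context)
--
-- def is_P4(context):
--     return is_epsilon_empty(context) and not is_delta_empty(context) and not is_omega_empty(context)
--
-- def is_P5(context):
--     return not is_epsilon_empty(context) and is_delta_empty(context) and is_omega_empty(context)
--
-- def is_P6(context):
--     return not is_epsilon_empty(context) and is_delta_empty(context) and not is_omega_empty(context)
--
-- def is_P7(context):
--     return not is_epsilon_empty(context) and not is_delta_empty(context) and is_omega_empty(context)
--
-- def is_P8(context):
--     return not is_epsilon_empty(context) and not is_delta_empty(context) and not is_omega_empty(context)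
-- ===== SOURCE B (Python) =====
-- def partition_all_context(all_context):
--     names = ("P1", "P2", "P3", "P4", "P5", "P6", "P7", "P8")
--
--     def idx(l):
--         c = l[1]
--         return 4 * bool(c[0]) + 2 * bool(c[1]) + bool(c[2])
--
--     return {name: [l for l in all_context if idx(l) == i]
--             for i, name in enumerate(names)}
-- ===== Notes on version B (the rewrite author's own statement) =====
-- stated objective: simpler
-- what changed: Replaces the 8-way is_P1..is_P8 if/elif chain and mutable-dict single pass by a computed bucket index (4*e+2*d+o from the three truthiness flags) and a dict comprehension that builds each partition as one filter of the input, dropping all eight helper predicates.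
import Mathlib
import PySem

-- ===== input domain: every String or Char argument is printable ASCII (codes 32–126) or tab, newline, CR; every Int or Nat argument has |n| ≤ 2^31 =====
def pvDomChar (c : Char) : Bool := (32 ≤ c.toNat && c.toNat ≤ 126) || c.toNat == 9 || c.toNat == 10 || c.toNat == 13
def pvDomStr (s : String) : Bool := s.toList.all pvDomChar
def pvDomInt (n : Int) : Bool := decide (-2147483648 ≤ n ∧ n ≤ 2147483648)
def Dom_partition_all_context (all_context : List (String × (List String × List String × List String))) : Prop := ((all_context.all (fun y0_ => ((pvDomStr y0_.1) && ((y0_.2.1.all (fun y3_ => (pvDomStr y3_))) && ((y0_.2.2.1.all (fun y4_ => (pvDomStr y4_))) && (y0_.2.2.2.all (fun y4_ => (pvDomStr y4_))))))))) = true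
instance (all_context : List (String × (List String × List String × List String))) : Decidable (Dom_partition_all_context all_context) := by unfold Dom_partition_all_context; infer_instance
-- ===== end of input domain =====

-- B replaces A's 8-way if/elif predicate chain over a mutable dict by a computed bucket index
-- (4*e+2*d+o) and one filter of the input per partition (simpler; same O(n·k) cost).


-- ===== PORT A =====
def pvIsEpsilonEmpty (context : List String × List String × List String) : Bool :=
  PySem.List.len context.1 == 0

def pvIsDeltaEmpty (context : List String × List String × List String) : Bool :=
  PySem.List.len context.2.1 == 0

def pvIsOmegaEmpty (context : List String × List String × List String) : Bool :=
  PySem.List.len context.2.2 == 0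

def pvIsP1 (c : List String × List String × List String) : Bool :=
  pvIsEpsilonEmpty c && pvIsDeltaEmpty c && pvIsOmegaEmpty c
def pvIsP2 (c : List String × List String × List String) : Bool :=
  pvIsEpsilonEmpty c && pvIsDeltaEmpty c && !pvIsOmegaEmpty c
def pvIsP3 (c : List String × List String × List String) : Bool :=
  pvIsEpsilonEmpty c && !pvIsDeltaEmpty c && pvIsOmegaEmpty c
def pvIsP4 (c : List String × List String × List String) : Bool :=
  pvIsEpsilonEmpty c && !pvIsDeltaEmpty c && !pvIsOmegaEmpty c
def pvIsP5 (c : List String × List String × List String) : Bool :=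
  !pvIsEpsilonEmpty c && pvIsDeltaEmpty c && pvIsOmegaEmpty c
def pvIsP6 (c : List String × List String × List String) : Bool :=
  !pvIsEpsilonEmpty c && pvIsDeltaEmpty c && !pvIsOmegaEmpty c
def pvIsP7 (c : List String × List String × List String) : Bool :=
  !pvIsEpsilonEmpty c && !pvIsDeltaEmpty c && pvIsOmegaEmpty c
def pvIsP8 (c : List String × List String × List String) : Bool :=
  !pvIsEpsilonEmpty c && !pvIsDeltaEmpty c && !pvIsOmegaEmpty c

-- the body of A's second for-loop (append into the matching partition, first match wins)
def pvStepA (d : PySem.Dict String (List (String × (List String × List String × List String))))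
    (l : String × (List String × List String × List String)) :
    PySem.Dict String (List (String × (List String × List String × List String))) :=
  let context := l.2
  if pvIsP1 context then d.modify "P1" [] (fun xs => xs ++ [l])
  else if pvIsP2 context then d.modify "P2" [] (fun xs => xs ++ [l])
  else if pvIsP3 context then d.modify "P3" [] (fun xs => xs ++ [l])
  else if pvIsP4 context then d.modify "P4" [] (fun xs => xs ++ [l])
  else if pvIsP5 context then d.modify "P5" [] (fun xs => xs ++ [l])
  else if pvIsP6 context then d.modify "P6" [] (fun xs => xs ++ [l])
  else if pvIsP7 context then d.modify "P7" [] (fun xs => xs ++ [l])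
  else if pvIsP8 context then d.modify "P8" [] (fun xs => xs ++ [l])
  else d

def partition_all_context (all_context : List (String × (List String × List String × List String))) : List (String × List (String × (List String × List String × List String))) :=
  (all_context.foldl pvStepA
    ((["P1","P2","P3","P4","P5","P6","P7","P8"]).foldl
      (fun d p => d.insert p []) PySem.Dict.empty)).items

-- ===== PORT B =====
def pvIdxB (l : String × (List String × List String × List String)) : Nat :=
  let c := l.2
  4 * (if c.1.isEmpty then 0 else 1) + 2 * (if c.2.1.isEmpty then 0 else 1) +
    (if c.2.2.isEmpty then 0 else 1)

def partition_all_context_alt (all_context : List (String × (List String × List String × List String))) : List (String × List (String × (List String × List String × List String))) :=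
  (["P1","P2","P3","P4","P5","P6","P7","P8"]).zipIdx.map
    (fun ni => (ni.1, all_context.filter (fun l => pvIdxB l == ni.2)))

-- ===== PRECONDITION & SPEC =====
-- explicit DecidableEq for the nested output type (plain infer_instance hits the synthesizer's size limit)
def pvDecEqOut : DecidableEq (List (String × List (String × (List String × List String × List String)))) :=
  @instDecidableEqList _ (@instDecidableEqProd _ _ inferInstance (@instDecidableEqList _ inferInstance))

def Spec_partition_all_context (all_context : List (String × (List String × List String × List String))) (out : List (String × List (String × (List String × List String × List String)))) : Prop := out = partition_all_context_alt all_context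
instance (all_context : List (String × (List String × List String × List String))) (out : List (String × List (String × (List String × List String × List String)))) : Decidable (Spec_partition_all_context all_context out) := by unfold Spec_partition_all_context; exact pvDecEqOut out _

-- ===== CLAIM (what is proved, stated in full; the proofs are below) =====
def Claim_equal_partition_all_context : Prop := ∀ (all_context : List (String × (List String × List String × List String))), Dom_partition_all_context all_context → Spec_partition_all_context all_context (partition_all_context all_context)

-- ===== LEMMAS AND PROOFS =====

-- invariant of A's loop: starting from the literal 8-key dict with buckets a0..a7,
-- the fold ends with each bucket extended by the B-side filter of the remaining input
lemma pvLoopA_inv (rest : List (String × (List String × List String × List String)))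
    (a0 a1 a2 a3 a4 a5 a6 a7 : List (String × (List String × List String × List String))) :
    rest.foldl pvStepA (PySem.Dict.mk
      [("P1",a0),("P2",a1),("P3",a2),("P4",a3),("P5",a4),("P6",a5),("P7",a6),("P8",a7)])
    = PySem.Dict.mk
      [("P1", a0 ++ rest.filter (fun l => pvIdxB l == 0)),
       ("P2", a1 ++ rest.filter (fun l => pvIdxB l == 1)),
       ("P3", a2 ++ rest.filter (fun l => pvIdxB l == 2)),
       ("P4", a3 ++ rest.filter (fun l => pvIdxB l == 3)),
       ("P5", a4 ++ rest.filter (fun l => pvIdxB l == 4)),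
       ("P6", a5 ++ rest.filter (fun l => pvIdxB l == 5)),
       ("P7", a6 ++ rest.filter (fun l => pvIdxB l == 6)),
       ("P8", a7 ++ rest.filter (fun l => pvIdxB l == 7))] := by
  induction rest generalizing a0 a1 a2 a3 a4 a5 a6 a7 with
  | nil => simp
  | cons l rest ih =>
    have key : ∀ (xs : List String), ((xs.length : Int) == 0) = xs.isEmpty := by
      intro xs; cases xs with
      | nil => simp
      | cons h t => simp; omega
    have he : pvIsEpsilonEmpty l.2 = l.2.1.isEmpty := by
      simp only [pvIsEpsilonEmpty, PySem.List.len_eq]; exact key _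
    have hd : pvIsDeltaEmpty l.2 = l.2.2.1.isEmpty := by
      simp only [pvIsDeltaEmpty, PySem.List.len_eq]; exact key _
    have ho : pvIsOmegaEmpty l.2 = l.2.2.2.isEmpty := by
      simp only [pvIsOmegaEmpty, PySem.List.len_eq]; exact key _
    rw [List.foldl_cons]
    rcases e : l.2.1.isEmpty <;> rcases d : l.2.2.1.isEmpty <;> rcases o : l.2.2.2.isEmpty <;>
      simp only [pvStepA, pvIsP1, pvIsP2, pvIsP3, pvIsP4, pvIsP5, pvIsP6, pvIsP7, pvIsP8,
        he, hd, ho, e, d, o, Bool.not_true, Bool.not_false, Bool.false_and,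
        Bool.and_true, Bool.and_false, Bool.and_self, if_true, if_false] <;>
      simp only [PySem.Dict.modify, PySem.Dict.insert, PySem.Dict.getD, PySem.Dict.get?,
        PySem.Dict.contains] <;>
      simp_all [List.filter_cons, pvIdxB]

theorem partition_all_context_spec : Claim_equal_partition_all_context := by
  intro all_context _
  show partition_all_context all_context = partition_all_context_alt all_context
  unfold partition_all_context
  have hinit : (["P1","P2","P3","P4","P5","P6","P7","P8"]).foldl
      (fun (d : PySem.Dict String (List (String × (List String × List String × List String)))) p => d.insert p []) PySem.Dict.empty
    = PySem.Dict.mk [("P1",[]),("P2",[]),("P3",[]),("P4",[]),("P5",[]),("P6",[]),("P7",[]),("P8",[])] := by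
    decide
  rw [hinit, pvLoopA_inv]
  simp [partition_all_context_alt, List.zipIdx]
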